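-- pv_equiv track=rewrite | github.com/Jaap-Meerhof/Q-routing_variations | node.py | delete_until
-- ===== SOURCE A (Python) =====
-- def delete_until(route, edge_id):
--     loop_edges_id = list()
--     #loop_edges_id.append(route[-1])
--     for i in range(len(route) - 1, -1, -1):
--         route_edge = route[i]
--         route.pop(i)
--         loop_edges_id.append(route_edge) #maybe behind return?
--         if route_edge == edge_id:
--             #loop_edges_id.append(route_edge)
--             return route, loop_edges_id
--     return route, loop_edges_id
-- ===== SOURCE B (Python) =====
-- def delete_until(route, edge_id):
--     try:
--         rpos = route[::-1].index(edge_id)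
--     except ValueError:
--         loop_edges_id = route[::-1]
--         del route[:]
--         return route, loop_edges_id
--     idx = len(route) - 1 - rpos
--     loop_edges_id = route[idx:][::-1]
--     del route[idx:]
--     return route, loop_edges_id
-- ===== Notes on version B (the rewrite author's own statement) =====
-- stated objective: simpler
-- what changed: Replaced the element-by-element reverse pop-and-append loop by a single reverse search for the last occurrence of edge_id followed by one bulk slice split (and in-place del), with no loop at all.
import Mathlib
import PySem

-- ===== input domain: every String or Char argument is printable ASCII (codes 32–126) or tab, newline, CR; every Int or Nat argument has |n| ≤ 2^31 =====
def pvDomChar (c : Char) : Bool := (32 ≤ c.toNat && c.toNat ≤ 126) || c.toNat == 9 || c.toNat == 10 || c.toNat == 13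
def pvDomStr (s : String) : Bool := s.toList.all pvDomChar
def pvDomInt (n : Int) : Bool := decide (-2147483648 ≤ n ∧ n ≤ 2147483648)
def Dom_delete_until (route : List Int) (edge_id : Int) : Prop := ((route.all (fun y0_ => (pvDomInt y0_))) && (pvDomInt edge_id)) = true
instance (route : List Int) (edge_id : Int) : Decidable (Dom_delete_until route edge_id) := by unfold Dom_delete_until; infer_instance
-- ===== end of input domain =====

-- B replaces A's reverse pop-and-append loop by one reverse search for the last occurrence plus a
-- single bulk slice split (simpler, no loop); both Pythons also truncate `route` in place identically,
-- the equivalence proved here is about the returned pair.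

-- ===== PORT A =====
-- A's loop: for i in range(len(route)-1, -1, -1), each step pops index i (then the last index),
-- appends the element, stops when it equals edge_id. Structural recursion on the countdown index.
def delete_until_go : Nat → List Int → Int → List Int → List Int × List Int
  | 0, route, _, acc => (route, acc)
  | i+1, route, edge_id, acc =>
    match PySem.List.pop? route (i : Int) with
    | none => (route, acc)   -- unreachable: i is always in range (totality guard only)
    | some (route_edge, route') =>
      let acc' := acc ++ [route_edge]
      if route_edge = edge_id then (route', acc')
      else delete_until_go i route' edge_id acc'

def delete_until (route : List Int) (edge_id : Int) : List Int × List Int :=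
  delete_until_go route.length route edge_id []

-- ===== PORT B =====
-- Source B: rpos = route[::-1].index(edge_id) (ValueError -> clear list); idx = len-1-rpos;
-- loop = route[idx:][::-1]; del route[idx:]; return route, loop.
def delete_until_alt (route : List Int) (edge_id : Int) : List Int × List Int :=
  match PySem.List.index? route.reverse edge_id with
  | none => ([], route.reverse)
  | some rpos =>
    let idx : Nat := route.length - 1 - rpos
    (route.take idx, (route.drop idx).reverse)

-- ===== PRECONDITION & SPEC =====
def Spec_delete_until (route : List Int) (edge_id : Int) (out : List Int × List Int) : Prop := out = delete_until_alt route edge_id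
instance (route : List Int) (edge_id : Int) (out : List Int × List Int) : Decidable (Spec_delete_until route edge_id out) := by unfold Spec_delete_until; infer_instance

-- ===== CLAIM (what is proved, stated in full; the proofs are below) =====
def Claim_equal_delete_until : Prop := ∀ (route : List Int) (edge_id : Int), Dom_delete_until route edge_id → Spec_delete_until route edge_id (delete_until route edge_id)

-- ===== LEMMAS AND PROOFS =====

lemma delete_until_go_eq (route : List Int) (edge_id : Int) (acc : List Int) :
    delete_until_go route.length route edge_id acc =
      ((delete_until_alt route edge_id).1, acc ++ (delete_until_alt route edge_id).2) := by
  induction route using List.reverseRecOn generalizing acc with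
  | nil => simp [delete_until_go, delete_until_alt]
  | append_singleton xs x ih =>
    have hpop : PySem.List.pop? (xs ++ [x]) ((xs.length : Nat) : Int) =
        some ((xs ++ [x])[xs.length]'(by simp), (xs ++ [x]).eraseIdx xs.length) :=
      PySem.List.pop?_natCast (xs ++ [x]) xs.length (by simp)
    have hlen : (xs ++ [x]).length = xs.length + 1 := by simp
    rw [hlen]
    simp only [delete_until_go, hpop]
    have hget : (xs ++ [x])[xs.length]'(by simp) = x := by simp
    have herase : (xs ++ [x]).eraseIdx xs.length = xs := by
      simpa using List.eraseIdx_append_of_length_le (le_refl xs.length) [x]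
    rw [hget, herase]
    by_cases hxe : x = edge_id
    · subst hxe
      have h0 : PySem.List.index? (xs ++ [x]).reverse x = some 0 := by
        rw [List.reverse_append]
        simpa using PySem.List.index?_cons_self x xs.reverse
      simp only [delete_until_alt, h0]
      have hi : (xs ++ [x]).length - 1 - 0 = xs.length := by simp
      rw [hi, List.take_left, List.drop_left]
      simp
    · simp only [if_neg hxe]
      rw [ih]
      have hidx : PySem.List.index? (xs ++ [x]).reverse edge_id =
          (PySem.List.index? xs.reverse edge_id).map (· + 1) := by
        rw [List.reverse_append]
        simpa using PySem.List.index?_cons_of_ne xs.reverse hxe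
      cases hr : PySem.List.index? xs.reverse edge_id with
      | none =>
        simp only [delete_until_alt]
        rw [hidx, hr]
        simp
      | some r =>
        have hrlt : r < xs.length := by
          obtain ⟨hk, _, _⟩ := PySem.List.getElem_of_index?_eq_some hr
          simpa using hk
        simp only [delete_until_alt]
        rw [hidx, hr]
        simp only [Option.map_some]
        have hidx1 : (xs ++ [x]).length - 1 - (r + 1) = xs.length - 1 - r := by
          simp; omega
        rw [hidx1]
        have hle : xs.length - 1 - r <= xs.length := by omega
        rw [List.take_append_of_le_length hle, List.drop_append_of_le_length hle]
        simp

theorem delete_until_spec : Claim_equal_delete_until := by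
  intro route edge_id _
  unfold Spec_delete_until delete_until
  rw [delete_until_go_eq]
  simp
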